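-- pv_equiv track=rewrite | github.com/2024-2-analitica-descriptiva/2024-2-LAB-01-programacion-basica-en-python-Paolabustos0510 | homework/pregunta_02.py | pregunta_02
-- ===== SOURCE A (Python) =====
-- def pregunta_02(datos):
--     """
--     Retorne la cantidad de registros por cada letra de la primera columna como
--     la lista de tuplas (letra, cantidad), ordendas alfabéticamente.
--
--     Rta/
--     [('A', 8), ('B', 7), ('C', 5), ('D', 6), ('E', 14)]
--
--     """
--     conteo = {}
--     for fila in datos:
--         letra = fila[0]
--         if letra in conteo:
--             conteo[letra] += 1
--         else:
--             conteo[letra] = 1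
--
--     resultado = sorted(conteo.items()) #sorted genera una lista ordenada, no entiendo qué hace items
--     return resultado
-- ===== SOURCE B (Python) =====
-- def pregunta_02(datos):
--     letras = sorted(fila[0] for fila in datos)
--     resultado = []
--     i = 0
--     n = len(letras)
--     while i < n:
--         j = i + 1
--         while j < n and letras[j] == letras[i]:
--             j += 1
--         resultado.append((letras[i], j - i))
--         i = j
--     return resultado
-- ===== Notes on version B (the rewrite author's own statement) =====
-- stated objective: alternative
-- what changed: Replaces the dict-accumulate-then-sort-items strategy with sorting the list of first characters and counting consecutive runs in one grouping pass; Pre_ excludes lists containing an empty string, on which A raises IndexError at fila[0] (B raises there too).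
import Mathlib
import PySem

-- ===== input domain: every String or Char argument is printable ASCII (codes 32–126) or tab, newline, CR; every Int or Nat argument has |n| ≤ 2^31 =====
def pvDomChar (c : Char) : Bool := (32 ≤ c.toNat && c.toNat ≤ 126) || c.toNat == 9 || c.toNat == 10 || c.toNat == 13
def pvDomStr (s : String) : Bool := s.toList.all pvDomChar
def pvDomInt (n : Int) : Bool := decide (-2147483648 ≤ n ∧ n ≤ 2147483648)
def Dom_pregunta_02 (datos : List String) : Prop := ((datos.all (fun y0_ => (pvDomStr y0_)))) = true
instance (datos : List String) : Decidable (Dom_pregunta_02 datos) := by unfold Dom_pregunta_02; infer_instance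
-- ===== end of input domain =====

-- B replaces the dict-accumulate-then-sort-items strategy by: sort the first letters, then count consecutive runs.

-- fila[0] as a one-character Python string; Python raises IndexError on fila = "" (excluded by Pre_)
def pvFirst (fila : String) : String :=
  match PySem.Str.pyGet? fila 0 with
  | some c => String.ofList [c]
  | none => ""

-- ===== PORT A =====
def pregunta_02 (datos : List String) : List (String × Int) :=
  let conteo : PySem.Dict String Int :=
    datos.foldl (fun conteo fila =>
      let letra := pvFirst fila
      if conteo.contains letra then
        conteo.insert letra (conteo.getD letra 0 + 1)
      else
        conteo.insert letra 1) PySem.Dict.empty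
  PySem.List.sorted2 conteo.items (fun p => p.1) (fun p => p.2) false

-- ===== PORT B =====
-- the inner while loop of Source B: one run of equal letters is scanned off and counted
def pvGroupRuns : List String → List (String × Int)
  | [] => []
  | c :: rest =>
      (c, 1 + ((rest.takeWhile (· == c)).length : Int)) :: pvGroupRuns (rest.dropWhile (· == c))
termination_by l => l.length
decreasing_by
  simp only [List.length_cons]
  exact Nat.lt_succ_of_le (List.length_dropWhile_le _ _)

def pregunta_02_alt (datos : List String) : List (String × Int) :=
  let letras := PySem.List.sorted (datos.map pvFirst) (fun x => x) false
  pvGroupRuns letras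

-- ===== PRECONDITION & SPEC =====
-- Pre_ excludes lists containing an empty string: there A raises IndexError at fila[0] (B raises there too).
def Pre_pregunta_02 (datos : List String) : Prop := ∀ s ∈ datos, s ≠ ""
instance (datos : List String) : Decidable (Pre_pregunta_02 datos) := by unfold Pre_pregunta_02; infer_instance
def pvWitness_pregunta_02 : List String := ["Alpha", "beta", "Avion", "C3", "beta"]

def Spec_pregunta_02 (datos : List String) (out : List (String × Int)) : Prop := out = pregunta_02_alt datos
instance (datos : List String) (out : List (String × Int)) : Decidable (Spec_pregunta_02 datos out) := by unfold Spec_pregunta_02; infer_instance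

-- ===== CLAIM (what is proved, stated in full; the proofs are below) =====
def Claim_equal_pregunta_02 : Prop := ∀ (datos : List String), Dom_pregunta_02 datos → Pre_pregunta_02 datos → Spec_pregunta_02 datos (pregunta_02 datos)

-- ===== LEMMAS AND PROOFS =====

-- insertBy only looks at `before x y` for y already in the list
theorem pv_insertBy_congr {α : Type} (b1 b2 : α → α → Bool) (x : α) (ys : List α)
    (h : ∀ y ∈ ys, b1 x y = b2 x y) :
    PySem.List.insertBy b1 x ys = PySem.List.insertBy b2 x ys := by
  induction ys with
  | nil => rfl
  | cons y ys ih =>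
      rw [PySem.List.insertBy.eq_2, PySem.List.insertBy.eq_2, h y (by simp)]
      by_cases hb : b2 x y = true
      · simp [hb]
      · simp only [Bool.not_eq_true] at hb
        simp [hb, ih (fun z hz => h z (by simp [hz]))]

-- a foldl of insertBy only compares members of the accumulator and of the list
theorem pv_foldl_insertBy_congr {α : Type} (b1 b2 : α → α → Bool) (xs acc : List α)
    (h : ∀ x ∈ xs, ∀ y, (y ∈ acc ∨ y ∈ xs) → b1 x y = b2 x y) :
    xs.foldl (fun a x => PySem.List.insertBy b1 x a) acc
      = xs.foldl (fun a x => PySem.List.insertBy b2 x a) acc := by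
  induction xs generalizing acc with
  | nil => rfl
  | cons x xs ih =>
      simp only [List.foldl_cons]
      rw [pv_insertBy_congr b1 b2 x acc (fun y hy => h x (by simp) y (Or.inl hy))]
      exact ih _ (fun z hz y hy => by
        refine h z (by simp [hz]) y ?_
        rcases hy with hy | hy
        · rcases (PySem.List.mem_insertBy b2 x y acc).mp hy with rfl | hy
          · exact Or.inr (by simp)
          · exact Or.inl hy
        · exact Or.inr (List.mem_cons_of_mem _ hy))

-- when the second key component is a function of the first on the list, a tuple-key sort is a first-key sort
theorem pv_sorted2_eq_sorted_fst {α κ₁ κ₂ : Type} [LinearOrder κ₁] [LinearOrder κ₂]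
    (xs : List α) (k1 : α → κ₁) (k2 : α → κ₂)
    (h : ∀ p ∈ xs, ∀ q ∈ xs, k1 p = k1 q → k2 p = k2 q) :
    PySem.List.sorted2 xs k1 k2 false = PySem.List.sorted xs k1 false := by
  rw [PySem.List.sorted_eq_foldl_insertBy]
  show xs.foldl (fun a x => PySem.List.insertBy _ x a) [] = _
  apply pv_foldl_insertBy_congr
  intro x hx y hy
  rcases hy with hy | hy
  · cases hy
  · rcases lt_trichotomy (k1 x) (k1 y) with hlt | heq | hgt
    · simp [hlt, not_lt.mpr hlt.le]
    · simp [heq, h x hx y hy heq]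
    · simp [not_lt.mpr hgt.le, hgt]

-- grouping a weakly increasing list of letters lists each distinct letter with its count
theorem pv_groupRuns_sorted (l : List String) (hs : l.Pairwise (· ≤ ·)) :
    pvGroupRuns l = (PySem.Set.ofList l).map (fun k => (k, (l.count k : Int))) := by
  induction l using pvGroupRuns.induct with
  | case1 => simp [pvGroupRuns, PySem.Set.ofList_nil]
  | case2 c rest ih =>
      set t := rest.takeWhile (· == c) with ht
      set d := rest.dropWhile (· == c) with hd
      have hrest : t ++ d = rest := List.takeWhile_append_dropWhile
      have htc : ∀ y ∈ t, y = c := by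
        intro y hy
        have := List.mem_takeWhile_imp hy
        simpa [eq_comm] using of_decide_eq_true this
      have hcle : ∀ y ∈ rest, c ≤ y := by
        have := (List.pairwise_cons.mp hs).1
        simpa using this
      have hdpw : d.Pairwise (· ≤ ·) :=
        List.Pairwise.sublist (List.dropWhile_sublist _) ((List.pairwise_cons.mp hs).2)
      have hcd : c ∉ d := by
        intro hcmem
        cases hde : d with
        | nil => rw [hde] at hcmem; cases hcmem
        | cons hd0 dtl =>
            have hh : ¬ (hd0 == c) = true := by
              have := List.head?_dropWhile_not (· == c) rest
              rw [← hd, hde] at this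
              simpa using this
            have hne : hd0 ≠ c := fun hcc => hh (by simp [hcc])
            have hle : c ≤ hd0 := hcle hd0 (by rw [← hrest, hde]; simp)
            have hlt : c < hd0 := lt_of_le_of_ne hle (fun hcc => hne hcc.symm)
            rw [hde] at hcmem
            rcases List.mem_cons.mp hcmem with rfl | hcm
            · exact absurd rfl hne
            · have := (List.pairwise_cons.mp (hde ▸ hdpw)).1 c hcm
              exact absurd (lt_of_lt_of_le hlt this) (lt_irrefl c)
      -- set of the whole list: c followed by the set of d
      have hset : PySem.Set.ofList (c :: rest) = c :: PySem.Set.ofList d := by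
        rw [PySem.Set.ofList_cons_eq_update, ← hrest, PySem.Set.update_append]
        have h1 : PySem.Set.update [c] t = [c] := by
          rw [PySem.Set.update_eq_append_filter]
          have : (PySem.Set.ofList t).filter (fun y => !(PySem.Set.contains [c] y)) = [] := by
            apply List.filter_eq_nil_iff.mpr
            intro y hy
            have := htc y ((PySem.Set.mem_ofList _ _).mp hy)
            simp [this, PySem.Set.contains]
          rw [this, List.append_nil]
        rw [h1, PySem.Set.update_eq_append_filter]
        have h2 : (PySem.Set.ofList d).filter (fun y => !(PySem.Set.contains [c] y)) = PySem.Set.ofList d := by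
          apply List.filter_eq_self.mpr
          intro y hy
          have hyd := (PySem.Set.mem_ofList _ _).mp hy
          have : y ≠ c := fun hyc => hcd (hyc ▸ hyd)
          simp [PySem.Set.contains, this]
        rw [h2]; rfl
      -- counts
      have hcount_c : ((c :: rest).count c : Int) = 1 + (t.length : Int) := by
        have h1 : t.count c = t.length := List.count_eq_length.mpr (fun b hb => by
          simp [htc b hb])
        have h2 : d.count c = 0 := List.count_eq_zero.mpr hcd
        rw [← hrest]
        simp [List.count_append, h1, h2]
        omega
      have hcount_k : ∀ k ∈ PySem.Set.ofList d, ((c :: rest).count k : Int) = (d.count k : Int) := by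
        intro k hk
        have hkd := (PySem.Set.mem_ofList _ _).mp hk
        have hkc : k ≠ c := fun hkc => hcd (hkc ▸ hkd)
        have h1 : t.count k = 0 := List.count_eq_zero.mpr (fun hkt => hkc (htc k hkt))
        rw [← hrest]
        simp [List.count_append, h1, Ne.symm hkc]
      rw [pvGroupRuns, ih hdpw, hset]
      simp only [List.map_cons]
      refine congrArg₂ _ (by rw [hcount_c]) ?_
      apply List.map_congr_left
      intro k hk
      simp [hcount_k k hk]

-- Set.ofList keeps a subsequence (the first occurrences) of its argument
theorem pv_ofList_sublist {α : Type} [BEq α] [LawfulBEq α] (l : List α) :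
    (PySem.Set.ofList l).Sublist l := by
  induction l using List.reverseRecOn with
  | nil => simp [PySem.Set.ofList_nil]
  | append_singleton xs x ih =>
      rw [PySem.Set.ofList_append_singleton, PySem.Set.add_eq_ite]
      split
      · exact ih.trans (List.sublist_append_left _ _)
      · exact List.Sublist.append ih (List.Sublist.refl _)

-- the set of a sorted list is the sorted set of the list
theorem pv_ofList_sorted (L : List String) :
    PySem.Set.ofList (PySem.List.sorted L (fun x => x) false)
      = PySem.List.sorted (PySem.Set.ofList L) (fun x => x) false := by
  refine (PySem.List.sorted_eq_of_perm_of_pairwise_lt _ _ _ ?_ ?_).symm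
  · -- permutation
    apply (List.perm_ext_iff_of_nodup (PySem.Set.nodup_ofList _) (PySem.Set.nodup_ofList _)).mpr
    intro a
    simp only [PySem.Set.mem_ofList, PySem.List.mem_sorted]
  · -- strictly increasing: Nodup + weakly increasing
    have hpw : (PySem.Set.ofList (PySem.List.sorted L (fun x => x) false)).Pairwise (· ≤ ·) :=
      List.Pairwise.sublist (pv_ofList_sublist _)
        (by simpa using PySem.List.sorted_pairwise L (fun x => x))
    have hnd := PySem.Set.nodup_ofList (PySem.List.sorted L (fun x => x) false)
    exact (hpw.and hnd).imp (fun h => lt_of_le_of_ne h.1 h.2)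

-- ===== VERDICT (by name: the statement is the Claim_ definition above) =====
theorem pregunta_02_spec : Claim_equal_pregunta_02 := by
  intro datos _ _
  show PySem.List.sorted2
      (datos.foldl (fun conteo fila =>
        let letra := pvFirst fila
        if conteo.contains letra then conteo.insert letra (conteo.getD letra 0 + 1)
        else conteo.insert letra 1) PySem.Dict.empty).items
      (fun p => p.1) (fun p => p.2) false
    = pvGroupRuns (PySem.List.sorted (datos.map pvFirst) (fun x => x) false)
  have hdict : datos.foldl (fun conteo fila =>
        let letra := pvFirst fila
        if conteo.contains letra then conteo.insert letra (conteo.getD letra 0 + 1)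
        else conteo.insert letra 1) PySem.Dict.empty
      = PySem.Dict.counter (datos.map pvFirst) := by
    calc datos.foldl (fun conteo fila =>
          let letra := pvFirst fila
          if conteo.contains letra then conteo.insert letra (conteo.getD letra 0 + 1)
          else conteo.insert letra 1) PySem.Dict.empty
        = datos.foldl (fun conteo fila =>
            conteo.insert (pvFirst fila) (conteo.getD (pvFirst fila) 0 + 1))
            PySem.Dict.empty := by
          apply PySem.List.foldl_congr_mem
          intro d x _
          by_cases hc : d.contains (pvFirst x) = true
          · simp [hc]
          · simp only [Bool.not_eq_true] at hc
            simp [hc, PySem.Dict.getD_of_not_contains _ _ hc]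
      _ = (datos.map pvFirst).foldl
            (fun (d : PySem.Dict String Int) x => d.insert x (d.getD x 0 + 1))
            PySem.Dict.empty :=
          (List.foldl_map (f := pvFirst)
            (g := fun (d : PySem.Dict String Int) x => d.insert x (d.getD x 0 + 1))).symm
      _ = PySem.Dict.counter (datos.map pvFirst) :=
          PySem.Dict.foldl_insert_getD_add_one_eq_counter _
  rw [hdict, PySem.Dict.items_counter]
  -- the tuple-key sort is a first-key sort (the count is a function of the key)
  rw [pv_sorted2_eq_sorted_fst _ _ _ (by
    intro p hp q hq h1
    rcases List.mem_map.mp hp with ⟨a, _, rfl⟩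
    rcases List.mem_map.mp hq with ⟨b, _, rfl⟩
    simp only at h1 ⊢
    rw [h1])]
  -- sorting the (key, count) pairs = mapping over the sorted distinct keys
  rw [PySem.List.sorted_eq_of_perm_of_pairwise_lt _
    ((PySem.List.sorted (PySem.Set.ofList (datos.map pvFirst)) (fun x => x) false).map
      (fun k => (k, ((datos.map pvFirst).count k : Int)))) _
    ((PySem.List.sorted_perm _ _ _).map _)
    (List.pairwise_map.mpr
      ((PySem.List.sorted_ofList_pairwise_lt (datos.map pvFirst)).imp (fun h => by simpa using h)))]
  -- B: group the sorted letters
  rw [pv_groupRuns_sorted _ (by simpa using PySem.List.sorted_pairwise (datos.map pvFirst) (fun x => x))]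
  rw [pv_ofList_sorted]
  apply List.map_congr_left
  intro k _
  rw [List.Perm.count_eq (PySem.List.sorted_perm _ _ _)]
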